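-- pv_equiv track=rewrite | github.com/leylabmpi/pyTecanFluent | pyTecanFluent/Utils.py | tip_batch
-- ===== SOURCE A (Python) =====
-- def tip_batch(x, n_tip_reuse=1):
--     """Grouping asp/disp into tip-reuse batches
--     """
--     x = list(x)
--     batchID = 0
--     channel_cycles = 1
--     last_value = 0
--     y = []
--     for xx in x:
--         if xx < last_value:
--             if channel_cycles % n_tip_reuse == 0:
--                 batchID += 1
--             channel_cycles += 1
--         y.append(batchID)
--         last_value = xx
--     return y
-- ===== SOURCE B (Python) =====
-- def tip_batch(x, n_tip_reuse=1):
--     """Grouping asp/disp into tip-reuse batches.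
--
--     Three passes: flag each descent (an element below its predecessor,
--     with 0 before the first), prefix-sum the flags into running descent
--     counts, and divide each count by the reuse factor to get its batch id.
--     """
--     x = list(x)
--     flags = [b < a for a, b in zip([0] + x, x)]
--     descents = []
--     total = 0
--     for f in flags:
--         total += f
--         descents.append(total)
--     return [d // n_tip_reuse for d in descents]
-- ===== Notes on version B (the rewrite author's own statement) =====
-- stated objective: simpler
-- what changed: A's single stateful loop (batchID/channel_cycles/last_value) is replaced by three passes: descent flags, a prefix sum of the flags, and a map dividing each running descent count by the reuse factor; Pre_ restricts to the natural domain n_tip_reuse >= 1, since for n_tip_reuse <= 0 a reuse count is meaningless and A's values there (negative-divisor modulo batching, or zeros before a ZeroDivisionError) are accidents B's plain floor division does not reproduce.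
-- outside the precondition, e.g. on tip_batch([2, 1], -1): A returns [0, 1], B returns [0, -1]; on tip_batch([1, 2], 0): A returns [0, 0], B raises ZeroDivisionError
import Mathlib
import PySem

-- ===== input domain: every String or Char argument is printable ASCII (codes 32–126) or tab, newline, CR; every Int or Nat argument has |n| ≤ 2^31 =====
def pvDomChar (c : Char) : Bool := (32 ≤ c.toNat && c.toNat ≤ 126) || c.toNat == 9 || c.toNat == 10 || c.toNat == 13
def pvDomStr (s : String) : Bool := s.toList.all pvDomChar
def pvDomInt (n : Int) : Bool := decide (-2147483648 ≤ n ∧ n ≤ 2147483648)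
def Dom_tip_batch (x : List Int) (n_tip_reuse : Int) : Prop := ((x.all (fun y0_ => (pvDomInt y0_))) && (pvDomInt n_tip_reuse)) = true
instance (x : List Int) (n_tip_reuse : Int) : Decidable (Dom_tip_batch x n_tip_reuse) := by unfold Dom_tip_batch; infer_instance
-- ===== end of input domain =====

-- B replaces A's stateful batch loop by three passes (descent flags, a prefix sum, a division map); objective: simpler decomposition, same cost.

-- ===== PORT A =====
def tip_batch (x : List Int) (n_tip_reuse : Int) : List Int :=
  (x.foldl (fun (s : Int × Int × Int × List Int) xx =>
      let batchID := s.1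
      let cc := s.2.1
      let last := s.2.2.1
      let y := s.2.2.2
      if xx < last then
        let batchID' := if PySem.Int.mod cc n_tip_reuse = 0 then batchID + 1 else batchID
        (batchID', cc + 1, xx, y ++ [batchID'])
      else
        (batchID, cc, xx, y ++ [batchID]))
    (0, 1, 0, [])).2.2.2

-- ===== PORT B =====
def tip_batch_alt (x : List Int) (n_tip_reuse : Int) : List Int :=
  let flags := (List.zip ((0:Int) :: x) x).map (fun p => if p.2 < p.1 then (1:Int) else 0)
  let descents := (flags.foldl (fun (s : Int × List Int) f => (s.1 + f, s.2 ++ [s.1 + f])) (0, [])).2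
  descents.map (fun d => PySem.Int.floordiv d n_tip_reuse)

-- ===== PRECONDITION & SPEC =====
-- Pre_ restricts to the natural domain n_tip_reuse ≥ 1: a tip-reuse count is a positive
-- integer; for n_tip_reuse = 0 A raises ZeroDivisionError on any descent (returning zeros
-- only on descent-free lists), and for n_tip_reuse < 0 A's values come from Python's
-- negative-divisor modulo, an accident of the implementation B does not reproduce.
def Pre_tip_batch (x : List Int) (n_tip_reuse : Int) : Prop := 1 ≤ n_tip_reuse
instance (x : List Int) (n_tip_reuse : Int) : Decidable (Pre_tip_batch x n_tip_reuse) := by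
  unfold Pre_tip_batch; infer_instance

def pvWitness_tip_batch : List Int × Int := ([3, 1, 2, 0], 2)

def Spec_tip_batch (x : List Int) (n_tip_reuse : Int) (out : List Int) : Prop := out = tip_batch_alt x n_tip_reuse
instance (x : List Int) (n_tip_reuse : Int) (out : List Int) : Decidable (Spec_tip_batch x n_tip_reuse out) := by unfold Spec_tip_batch; infer_instance

-- ===== CLAIM (what is proved, stated in full; the proofs are below) =====
def Claim_equal_tip_batch : Prop := ∀ (x : List Int) (n_tip_reuse : Int), Dom_tip_batch x n_tip_reuse → Pre_tip_batch x n_tip_reuse → Spec_tip_batch x n_tip_reuse (tip_batch x n_tip_reuse)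

-- ===== LEMMAS AND PROOFS =====

-- running descent counts along x, starting from predecessor `last` with `d` descents so far
def goCounts (last : Int) (d : Nat) : List Int → List Nat
  | [] => []
  | xx :: rest =>
    let d' := if xx < last then d + 1 else d
    d' :: goCounts xx d' rest

-- B's running-sum fold produces the running descent counts
theorem bfold_snd (x : List Int) : ∀ (last : Int) (d : Nat) (ys : List Int),
    (((List.zip (last :: x) x).map (fun p => if p.2 < p.1 then (1:Int) else 0)).foldl
        (fun (s : Int × List Int) f => (s.1 + f, s.2 ++ [s.1 + f])) ((d : Int), ys)).2
      = ys ++ (goCounts last d x).map (fun k : Nat => (k : Int)) := by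
  induction x with
  | nil => intro last d ys; simp [goCounts]
  | cons xx rest ih =>
    intro last d ys
    rw [List.zip_cons_cons, List.map_cons, List.foldl_cons]
    by_cases hlt : xx < last
    · have hcast : ((d : Int) + 1) = ((d + 1 : Nat) : Int) := by push_cast; ring
      simp only [if_pos hlt, hcast]
      rw [ih xx (d + 1) (ys ++ [((d + 1 : Nat) : Int)])]
      simp [goCounts, hlt]
    · simp only [if_neg hlt, add_zero]
      rw [ih xx d (ys ++ [((d : Nat) : Int)])]
      simp [goCounts, hlt]

theorem out_eq (n : Int) (hn : 1 ≤ n) (k : Nat) :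
    PySem.Int.floordiv (k : Int) n = ((k / n.natAbs : Nat) : Int) := by
  have h0 : (0:Int) ≤ n := le_trans zero_le_one hn
  have hn' : n = (n.natAbs : Int) := (Int.natAbs_of_nonneg h0).symm
  rw [hn']
  exact_mod_cast PySem.Int.floordiv_natCast k n.natAbs

theorem tip_batch_alt_eq (x : List Int) (n : Int) :
    tip_batch_alt x n
      = (goCounts 0 0 x).map (fun k : Nat => PySem.Int.floordiv (k : Int) n) := by
  unfold tip_batch_alt
  have h := bfold_snd x 0 0 []
  simp only [Nat.cast_zero] at h
  dsimp only
  rw [h, List.nil_append, List.map_map]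
  rfl

-- A's fold, with batchID = d / |n| and channel_cycles = d + 1
theorem afold_eq (n : Int) (x : List Int) : ∀ (last : Int) (d : Nat) (y : List Int),
    (x.foldl (fun (s : Int × Int × Int × List Int) xx =>
      let batchID := s.1
      let cc := s.2.1
      let last := s.2.2.1
      let y := s.2.2.2
      if xx < last then
        let batchID' := if PySem.Int.mod cc n = 0 then batchID + 1 else batchID
        (batchID', cc + 1, xx, y ++ [batchID'])
      else
        (batchID, cc, xx, y ++ [batchID]))
      (((d / n.natAbs : Nat) : Int), (d : Int) + 1, last, y)).2.2.2
    = y ++ (goCounts last d x).map (fun k => ((k / n.natAbs : Nat) : Int)) := by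
  induction x with
  | nil => intro last d y; simp [goCounts]
  | cons xx rest ih =>
    intro last d y
    rw [List.foldl_cons]
    by_cases hlt : xx < last
    · have hcast : ((d : Int) + 1) = ((d + 1 : Nat) : Int) := by push_cast; ring
      have hiff : (PySem.Int.mod (((d + 1 : Nat) : Int)) n = 0) ↔ n.natAbs ∣ (d + 1) := by
        rw [PySem.Int.mod_eq_zero_iff_dvd, ← Int.natAbs_dvd, Int.natCast_dvd_natCast]
      have hbval :
          (if PySem.Int.mod (((d + 1 : Nat) : Int)) n = 0
             then ((d / n.natAbs : Nat) : Int) + 1 else ((d / n.natAbs : Nat) : Int))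
            = (((d + 1) / n.natAbs : Nat) : Int) := by
        rw [Nat.succ_div]
        by_cases hdv : n.natAbs ∣ (d + 1)
        · rw [if_pos (hiff.mpr hdv), if_pos hdv]; push_cast; ring
        · rw [if_neg (fun h => hdv (hiff.mp h)), if_neg hdv]; push_cast; ring
      simp only [if_pos hlt, hcast, hbval]
      rw [ih xx (d + 1) (y ++ [(((d + 1) / n.natAbs : Nat) : Int)])]
      simp [goCounts, hlt]
    · simp only [if_neg hlt]
      rw [ih xx d (y ++ [((d / n.natAbs : Nat) : Int)])]
      simp [goCounts, hlt]

-- ===== VERDICT (by name: the statement is the Claim_ definition above) =====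
theorem tip_batch_spec : Claim_equal_tip_batch := by
  intro x n _ hpre
  unfold Spec_tip_batch
  rw [tip_batch_alt_eq]
  unfold tip_batch
  have h := afold_eq n x 0 0 []
  simp only [Nat.cast_zero, Nat.zero_div, zero_add] at h
  rw [h, List.nil_append]
  exact List.map_congr_left (fun k _ => (out_eq n hpre k).symm)
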